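-- pv_equiv track=rewrite | github.com/Iliasoft/VPR | src/text_embeddings.py | w_vaildate
-- ===== SOURCE A (Python) =====
-- def has_symbols_from(word, sss):
--
--     for s in word:
--         if s in sss:
--             return True
--     return False
--
-- def w_vaildate(word, sss, anti_sss, len_thr):
--     # we can't have 3 or more such symbols in a row and no vowlets in a valid word
--     c = 0
--     for s in word:
--         if s in sss:
--             c += 1
--         else:
--             c = 0
--         if c == len_thr:
--             if not has_symbols_from(word, anti_sss):
--                 return False
--         elif c > len_thr + 2:
--             return False
--
--     return True
-- ===== SOURCE B (Python) =====
-- def w_vaildate(word, sss, anti_sss, len_thr):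
--     # Decision-table formulation: materialize the per-position run-length
--     # table once, then decide with two predicate scans over it.
--     has_anti = any(s in anti_sss for s in word)
--     runs = []
--     c = 0
--     for s in word:
--         c = c + 1 if s in sss else 0
--         runs.append(c)
--     if not has_anti and any(x == len_thr for x in runs):
--         return False
--     if any(x > len_thr + 2 for x in runs):
--         return False
--     return True
-- ===== Notes on version B (the rewrite author's own statement) =====
-- stated objective: alternative
-- what changed: B replaces A's single stateful loop with early returns (and a per-hit rescan of the word for anti-symbols) by computing has_anti once, materializing the full run-length table in one pass, and deciding the result by two predicate scans over that table.
import Mathlib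
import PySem

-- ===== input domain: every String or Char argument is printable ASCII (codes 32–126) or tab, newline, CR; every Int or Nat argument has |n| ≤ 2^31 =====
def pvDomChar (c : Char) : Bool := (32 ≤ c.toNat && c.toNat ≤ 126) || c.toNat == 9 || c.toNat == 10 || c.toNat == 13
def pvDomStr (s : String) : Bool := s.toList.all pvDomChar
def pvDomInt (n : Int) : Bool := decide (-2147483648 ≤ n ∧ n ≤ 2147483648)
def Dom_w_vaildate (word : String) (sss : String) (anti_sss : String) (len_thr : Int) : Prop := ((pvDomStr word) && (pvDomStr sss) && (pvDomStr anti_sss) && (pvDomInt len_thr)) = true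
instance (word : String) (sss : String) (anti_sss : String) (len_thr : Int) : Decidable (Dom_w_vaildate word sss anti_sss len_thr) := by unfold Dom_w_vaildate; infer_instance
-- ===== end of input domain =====

-- B is an alternative decomposition: has_anti computed once, run-length table built in one
-- pass, decision taken afterwards by two predicate scans over the table (no early returns).

-- ===== PORT A =====
-- helper has_symbols_from: scan word, return True at first symbol of sss
def hasSymbolsFrom (word : List Char) (sss : List Char) : Bool :=
  match word with
  | [] => false
  | s :: rest => if sss.contains s then true else hasSymbolsFrom rest sss

-- A's loop: counter c over the remaining chars, early returns as in the Python
def wLoopA (chars : List Char) (word sss anti : List Char) (len_thr : Int) (c : Int) : Bool :=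
  match chars with
  | [] => true
  | s :: rest =>
    let c' : Int := if sss.contains s then c + 1 else 0
    if c' == len_thr then
      if !hasSymbolsFrom word anti then false
      else wLoopA rest word sss anti len_thr c'
    else if c' > len_thr + 2 then false
    else wLoopA rest word sss anti len_thr c'

def w_vaildate (word : String) (sss : String) (anti_sss : String) (len_thr : Int) : Bool :=
  wLoopA word.toList word.toList sss.toList anti_sss.toList len_thr 0

-- ===== PORT B =====
-- per-position run-length table (B's one-pass construction)
def runsOf (chars : List Char) (sss : List Char) (c : Int) : List Int :=
  match chars with
  | [] => []
  | s :: rest =>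
    let c' : Int := if sss.contains s then c + 1 else 0
    c' :: runsOf rest sss c'

def w_vaildate_alt (word : String) (sss : String) (anti_sss : String) (len_thr : Int) : Bool :=
  let hasAnti := word.toList.any (fun s => anti_sss.toList.contains s)
  let runs := runsOf word.toList sss.toList 0
  if !hasAnti && runs.any (fun x => x == len_thr) then false
  else if runs.any (fun x => decide (x > len_thr + 2)) then false
  else true

-- ===== PRECONDITION & SPEC =====
def Spec_w_vaildate (word : String) (sss : String) (anti_sss : String) (len_thr : Int) (out : Bool) : Prop := out = w_vaildate_alt word sss anti_sss len_thr
instance (word : String) (sss : String) (anti_sss : String) (len_thr : Int) (out : Bool) : Decidable (Spec_w_vaildate word sss anti_sss len_thr out) := by unfold Spec_w_vaildate; infer_instance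

-- ===== CLAIM (what is proved, stated in full; the proofs are below) =====
def Claim_equal_w_vaildate : Prop := ∀ (word : String) (sss : String) (anti_sss : String) (len_thr : Int), Dom_w_vaildate word sss anti_sss len_thr → Spec_w_vaildate word sss anti_sss len_thr (w_vaildate word sss anti_sss len_thr)

-- ===== LEMMAS AND PROOFS =====

-- has_symbols_from is the `any` scan
theorem hasSymbolsFrom_eq_any (word sss : List Char) :
    hasSymbolsFrom word sss = word.any (fun s => sss.contains s) := by
  induction word with
  | nil => rfl
  | cons s rest ih =>
    cases h : sss.contains s <;> simp_all [hasSymbolsFrom]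

-- A's loop decided from the run-length table
theorem wLoopA_eq_table (chars : List Char) (word sss anti : List Char) (len_thr : Int) (c : Int) :
    wLoopA chars word sss anti len_thr c =
      (!( (!hasSymbolsFrom word anti && (runsOf chars sss c).any (fun x => x == len_thr))
          || (runsOf chars sss c).any (fun x => decide (x > len_thr + 2)) )) := by
  induction chars generalizing c with
  | nil => simp [wLoopA, runsOf]
  | cons s rest ih =>
    simp only [wLoopA, runsOf, List.any_cons, ih]
    generalize ((if sss.contains s then c + 1 else 0 : Int)) = d
    generalize hasSymbolsFrom word anti = ba
    generalize ((runsOf rest sss d).any (fun x => x == len_thr)) = a1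
    generalize ((runsOf rest sss d).any (fun x => decide (x > len_thr + 2))) = a2
    by_cases hd : d = len_thr
    · have hg : ¬ (d > len_thr + 2) := by omega
      cases ba <;> cases a1 <;> cases a2 <;> simp_all
    · by_cases hg : d > len_thr + 2 <;> cases ba <;> cases a1 <;> cases a2 <;> simp_all

-- ===== VERDICT (by name: the statement is the Claim_ definition above) =====
theorem w_vaildate_spec : Claim_equal_w_vaildate := by
  intro word sss anti_sss len_thr _
  show w_vaildate word sss anti_sss len_thr = w_vaildate_alt word sss anti_sss len_thr
  simp only [w_vaildate, w_vaildate_alt, wLoopA_eq_table, hasSymbolsFrom_eq_any]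
  generalize (word.toList.any (fun s => anti_sss.toList.contains s)) = ha
  generalize ((runsOf word.toList sss.toList 0).any (fun x => x == len_thr)) = a1
  generalize ((runsOf word.toList sss.toList 0).any (fun x => decide (x > len_thr + 2))) = a2
  cases ha <;> cases a1 <;> cases a2 <;> simp
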